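-- pv_equiv track=rewrite | github.com/jeonpapa/MA_JABIS | agents/hta_scrapers/au_tga.py | _split_by_brand
-- ===== SOURCE A (Python) =====
-- def _split_by_brand(lines: list[str], brand: str) -> list[str]:
--     paras: list[str] = []
--     buf: list[str] = []
--     for line in lines:
--         if line.upper().startswith(brand) and buf:
--             paras.append(" ".join(buf))
--             buf = [line]
--         else:
--             buf.append(line)
--     if buf:
--         paras.append(" ".join(buf))
--     return paras
-- ===== SOURCE B (Python) =====
-- def _split_by_brand(lines: list[str], brand: str) -> list[str]:
--     paras: list[str] = []
--     while lines:
--         body = [lines[0]]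
--         k = 1
--         while k < len(lines) and not lines[k].upper().startswith(brand):
--             body.append(lines[k])
--             k += 1
--         paras.append(" ".join(body))
--         lines = lines[k:]
--     return paras
-- ===== Notes on version B (the rewrite author's own statement) =====
-- stated objective: alternative
-- what changed: Replaces A's single pass with a running buffer and flush-on-brand-line by a two-level scan: an outer loop that takes one paragraph at a time, with an inner pointer advancing to the next brand-starting line and slicing the paragraph off the front of the list.
import Mathlib
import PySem

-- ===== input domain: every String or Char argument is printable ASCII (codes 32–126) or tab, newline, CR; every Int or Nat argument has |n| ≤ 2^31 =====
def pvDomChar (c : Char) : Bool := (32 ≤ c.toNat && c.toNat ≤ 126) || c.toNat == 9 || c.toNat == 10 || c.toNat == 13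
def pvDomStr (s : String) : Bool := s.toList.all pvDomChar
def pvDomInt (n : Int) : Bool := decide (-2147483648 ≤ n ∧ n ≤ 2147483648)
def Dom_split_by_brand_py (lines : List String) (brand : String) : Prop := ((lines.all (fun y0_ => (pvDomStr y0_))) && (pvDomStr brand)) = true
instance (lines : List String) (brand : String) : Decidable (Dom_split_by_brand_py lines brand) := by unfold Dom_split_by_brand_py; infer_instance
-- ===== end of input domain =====

-- B replaces A's running-buffer single pass by an outer take-one-paragraph loop with an
-- inner pointer to the next brand-starting line; same O(n) cost, alternative decomposition.

-- ===== PORT A =====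
-- one step of A's for-loop, state = (paras, buf)
def aStep (brand : String) (st : List String × List String) (line : String) :
    List String × List String :=
  if PySem.Str.startswith (PySem.Str.upper line) brand && !st.2.isEmpty then
    (st.1 ++ [PySem.Str.join " " st.2], [line])
  else
    (st.1, st.2 ++ [line])

def split_by_brand_py (lines : List String) (brand : String) : List String :=
  let st := lines.foldl (aStep brand) ([], [])
  if !st.2.isEmpty then st.1 ++ [PySem.Str.join " " st.2] else st.1

-- ===== PORT B =====
-- inner while: advance k past non-brand lines, appending them to body
def bInner (lines : List String) (brand : String) (k : Nat) (body : List String) :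
    List String × Nat :=
  if h : k < lines.length then
    if PySem.Str.startswith (PySem.Str.upper (lines[k]'h)) brand then (body, k)
    else bInner lines brand (k + 1) (body ++ [lines[k]'h])
  else (body, k)
termination_by lines.length - k

-- used by bLoop's termination: the inner pointer never moves backwards
theorem bInner_snd_ge (lines : List String) (brand : String) (k : Nat) (body : List String) :
    k ≤ (bInner lines brand k body).2 := by
  induction k, body using bInner.induct (lines := lines) (brand := brand) with
  | case1 k body h hP => rw [bInner, dif_pos h, if_pos hP]
  | case2 k body h hP ih =>
      rw [bInner, dif_pos h, if_neg hP]
      exact le_trans (Nat.le_succ k) ih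
  | case3 k body h => rw [bInner, dif_neg h]

-- outer while: take one paragraph off the front of the remaining lines
def bLoop (brand : String) : List String → List String → List String
  | paras, [] => paras
  | paras, l :: rest =>
      let bk := bInner (l :: rest) brand 1 [l]
      bLoop brand (paras ++ [PySem.Str.join " " bk.1]) ((l :: rest).drop bk.2)
termination_by _ lines => lines.length
decreasing_by
  have h1 := bInner_snd_ge (l :: rest) brand 1 [l]
  simp [List.length_drop]
  omega

def split_by_brand_py_alt (lines : List String) (brand : String) : List String :=
  bLoop brand [] lines

-- ===== PRECONDITION & SPEC =====
def Spec_split_by_brand_py (lines : List String) (brand : String) (out : List String) : Prop := out = split_by_brand_py_alt lines brand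
instance (lines : List String) (brand : String) (out : List String) : Decidable (Spec_split_by_brand_py lines brand out) := by unfold Spec_split_by_brand_py; infer_instance

-- ===== CLAIM (what is proved, stated in full; the proofs are below) =====
def Claim_equal_split_by_brand_py : Prop := ∀ (lines : List String) (brand : String), Dom_split_by_brand_py lines brand → Spec_split_by_brand_py lines brand (split_by_brand_py lines brand)

-- ===== LEMMAS AND PROOFS =====

-- the brand predicate
def pvP (brand : String) (l : String) : Bool :=
  PySem.Str.startswith (PySem.Str.upper l) brand

theorem dropWhile_eq_drop_len_takeWhile {α : Type} (p : α → Bool) (xs : List α) :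
    xs.dropWhile p = xs.drop (xs.takeWhile p).length := by
  induction xs with
  | nil => simp
  | cons x xs ih =>
      by_cases h : p x = true
      · simpa [h] using ih
      · simp [h]

-- characterisation of the inner while-loop
theorem bInner_eq (lines : List String) (brand : String) (k : Nat) (body : List String) :
    bInner lines brand k body =
      (body ++ (lines.drop k).takeWhile (fun l => !pvP brand l),
       k + ((lines.drop k).takeWhile (fun l => !pvP brand l)).length) := by
  induction k, body using bInner.induct (lines := lines) (brand := brand) with
  | case1 k body h hP =>
      have hd : lines.drop k = lines[k] :: lines.drop (k + 1) :=
        (List.getElem_cons_drop h).symm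
      have hP' : pvP brand (lines[k]'h) = true := hP
      rw [bInner, dif_pos h, if_pos hP, hd]
      simp [hP']
  | case2 k body h hP ih =>
      have hd : lines.drop k = lines[k] :: lines.drop (k + 1) :=
        (List.getElem_cons_drop h).symm
      have hP' : pvP brand (lines[k]'h) = false := Bool.eq_false_iff.mpr hP
      rw [bInner, dif_pos h, if_neg hP, ih, hd]
      rw [List.takeWhile_cons]
      refine Prod.ext ?_ ?_
      · simp [hP']
      · simp [hP']; omega
  | case3 k body h =>
      have hd : lines.drop k = ([] : List String) := by
        rw [List.drop_eq_nil_iff]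
        omega
      rw [bInner, dif_neg h, hd]
      simp

-- the outer loop only ever appends to its accumulator
theorem bLoop_acc_aux (brand : String) :
    ∀ (n : Nat) (lines : List String), lines.length ≤ n →
      ∀ (paras : List String), bLoop brand paras lines = paras ++ bLoop brand [] lines := by
  intro n
  induction n with
  | zero =>
      intro lines h paras
      have hnil : lines = [] := List.eq_nil_of_length_eq_zero (Nat.le_zero.mp h)
      subst hnil
      simp [bLoop]
  | succ n ih =>
      intro lines h paras
      cases lines with
      | nil => simp [bLoop]
      | cons l rest =>
          rw [bLoop, bLoop]
          have hge := bInner_snd_ge (l :: rest) brand 1 [l]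
          have hlen : (List.drop (bInner (l :: rest) brand 1 [l]).2 (l :: rest)).length ≤ n := by
            simp only [List.length_drop, List.length_cons] at *
            omega
          rw [ih _ hlen (paras ++ [PySem.Str.join " " (bInner (l :: rest) brand 1 [l]).1]),
              ih _ hlen ([] ++ [PySem.Str.join " " (bInner (l :: rest) brand 1 [l]).1])]
          simp

theorem bLoop_acc (brand : String) (paras : List String) (lines : List String) :
    bLoop brand paras lines = paras ++ bLoop brand [] lines :=
  bLoop_acc_aux brand lines.length lines le_rfl paras

-- unfolding bLoop on a nonempty list in takeWhile/dropWhile form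
theorem bLoop_cons (brand : String) (l : String) (rs : List String) :
    bLoop brand [] (l :: rs) =
      PySem.Str.join " " (l :: rs.takeWhile (fun x => !pvP brand x)) ::
        bLoop brand [] (rs.dropWhile (fun x => !pvP brand x)) := by
  rw [bLoop]
  rw [bInner_eq]
  simp only [List.drop_succ_cons, List.drop_zero]
  rw [dropWhile_eq_drop_len_takeWhile (fun x => !pvP brand x) rs]
  rw [bLoop_acc]
  rw [Nat.add_comm, List.drop_succ_cons]
  simp

-- finalisation of A's fold state
def aFinish (st : List String × List String) : List String :=
  if !st.2.isEmpty then st.1 ++ [PySem.Str.join " " st.2] else st.1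

-- the main invariant: A's fold from a nonempty buffer equals B's paragraph recursion
theorem main_inv (brand : String) (rest : List String) :
    ∀ (paras buf : List String), buf ≠ [] →
      aFinish (rest.foldl (aStep brand) (paras, buf)) =
        paras ++ PySem.Str.join " " (buf ++ rest.takeWhile (fun x => !pvP brand x)) ::
          bLoop brand [] (rest.dropWhile (fun x => !pvP brand x)) := by
  induction rest with
  | nil =>
      intro paras buf hbuf
      simp [aFinish, hbuf, bLoop]
  | cons l rs ih =>
      intro paras buf hbuf
      by_cases hP : pvP brand l = true
      · have hstep : aStep brand (paras, buf) l = (paras ++ [PySem.Str.join " " buf], [l]) := by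
          simp [aStep, pvP] at hP ⊢
          simp [hP, hbuf]
        rw [List.foldl_cons, hstep, ih _ [l] (by simp)]
        simp [hP, bLoop_cons]
      · have hstep : aStep brand (paras, buf) l = (paras, buf ++ [l]) := by
          simp [aStep, pvP] at hP ⊢
          simp [hP]
        rw [List.foldl_cons, hstep, ih _ (buf ++ [l]) (by simp)]
        simp [hP]

-- ===== VERDICT (by name: the statement is the Claim_ definition above) =====
theorem split_by_brand_py_spec : Claim_equal_split_by_brand_py := by
  intro lines brand _
  unfold Spec_split_by_brand_py split_by_brand_py split_by_brand_py_alt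
  cases lines with
  | nil => simp [bLoop]
  | cons l rest =>
      have hstep : aStep brand ([], []) l = ([], [l]) := by simp [aStep]
      show aFinish ((l :: rest).foldl (aStep brand) ([], [])) = bLoop brand [] (l :: rest)
      rw [List.foldl_cons, hstep, main_inv brand rest [] [l] (by simp), bLoop_cons]
      simp
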